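-- pv_equiv track=rewrite | github.com/MrBrantCode/unitest_baseline | mut_generate/mist_train_taco/taco_19313/solution.py | count_triplets_in_range
-- ===== SOURCE A (Python) =====
-- def count_triplets_in_range(Arr, N, L, R):
--     Arr.sort()
--     a = 0
--     b = 0
--
--     # Count triplets with sum <= R
--     for i in range(N - 2):
--         j = i + 1
--         k = N - 1
--         while j < k:
--             if Arr[i] + Arr[j] + Arr[k] <= R:
--                 a += k - j
--                 j += 1
--             else:
--                 k -= 1
--
--     # Count triplets with sum <= L-1
--     for i in range(N - 2):
--         j = i + 1
--         k = N - 1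
--         while j < k:
--             if Arr[i] + Arr[j] + Arr[k] <= L - 1:
--                 b += k - j
--                 j += 1
--             else:
--                 k -= 1
--
--     # The result is the difference between the two counts
--     return a - b
-- ===== SOURCE B (Python) =====
-- def _bisect_left(a, x, lo, hi):
--     while lo < hi:
--         mid = (lo + hi) // 2
--         if a[mid] < x:
--             lo = mid + 1
--         else:
--             hi = mid
--     return lo
--
--
-- def _bisect_right(a, x, lo, hi):
--     while lo < hi:
--         mid = (lo + hi) // 2
--         if x < a[mid]:
--             hi = mid
--         else:
--             lo = mid + 1
--     return lo
--
--
-- def count_triplets_in_range(Arr, N, L, R):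
--     # sorts Arr in place, exactly like the original
--     Arr.sort()
--     total = 0
--     for i in range(N - 2):
--         for j in range(i + 1, N - 1):
--             s = Arr[i] + Arr[j]
--             total += _bisect_right(Arr, R - s, j + 1, N) - _bisect_left(Arr, L - s, j + 1, N)
--     return total
-- ===== Notes on version B (the rewrite author's own statement) =====
-- stated objective: alternative
-- what changed: Replaces the two coordinated two-pointer sweeps (one for sums <= R, one for sums <= L-1) by a single pass over pairs (i,j) that counts the valid third elements directly with two hand-rolled binary searches on the sorted suffix Arr[j+1:N].
import Mathlib
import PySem

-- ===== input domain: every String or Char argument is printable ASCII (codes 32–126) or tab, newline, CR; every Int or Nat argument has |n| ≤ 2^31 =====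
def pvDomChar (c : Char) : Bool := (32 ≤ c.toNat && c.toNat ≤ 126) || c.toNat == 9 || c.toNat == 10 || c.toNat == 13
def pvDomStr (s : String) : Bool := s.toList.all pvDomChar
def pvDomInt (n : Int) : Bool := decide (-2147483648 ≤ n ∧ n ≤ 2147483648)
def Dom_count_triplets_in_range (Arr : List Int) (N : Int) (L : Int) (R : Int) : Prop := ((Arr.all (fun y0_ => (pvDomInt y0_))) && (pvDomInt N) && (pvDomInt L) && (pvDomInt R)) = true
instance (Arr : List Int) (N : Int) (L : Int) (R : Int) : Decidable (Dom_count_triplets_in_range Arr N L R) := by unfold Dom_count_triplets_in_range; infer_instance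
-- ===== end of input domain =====

-- B replaces A's two two-pointer sweeps by one pass over pairs (i,j) with two hand-rolled binary
-- searches on the sorted suffix (alternative algorithm, similar cost). Both Pythons sort Arr in
-- place; the equivalence proved here is about the return value.

-- ===== PORT A =====
-- Arr[x] after Pre_ guarantees the index is in range; getD 0 is never the value used
def pvGet (s : List Int) (x : Int) : Int := (PySem.List.pyGet? s x).getD 0

-- the 'while j < k' sweep of A, threshold T, fixed first index i; the fuel is exactly the
-- number of iterations left (k - j decreases by 1 each turn), so the 0-fuel arm is never the exit
def pvSweepGo (s : List Int) (T i : Int) : Nat → Int → Int → Int → Int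
  | 0, _, _, acc => acc
  | fuel + 1, j, k, acc =>
    if j < k then
      if pvGet s i + pvGet s j + pvGet s k ≤ T then
        pvSweepGo s T i fuel (j + 1) k (acc + (k - j))
      else
        pvSweepGo s T i fuel j (k - 1) acc
    else acc

def pvSweep (s : List Int) (T : Int) (i j k : Int) (acc : Int) : Int :=
  pvSweepGo s T i (k - j).toNat j k acc

def count_triplets_in_range (Arr : List Int) (N : Int) (L : Int) (R : Int) : Int :=
  let s := PySem.List.sorted Arr (fun x => x) false
  let a := (PySem.List.pyRange 0 (N - 2) 1).foldl (fun acc i => pvSweep s R i (i + 1) (N - 1) acc) 0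
  let b := (PySem.List.pyRange 0 (N - 2) 1).foldl (fun acc i => pvSweep s (L - 1) i (i + 1) (N - 1) acc) 0
  a - b

-- ===== PORT B =====
-- the 'while lo < hi' loop of Source B's _bisect_left; hi - lo shrinks by at least 1 per turn,
-- so fuel = hi - lo at entry suffices and the 0-fuel arm coincides with the loop exit
def pvBisectLeftGo (a : List Int) (x : Int) : Nat → Int → Int → Int
  | 0, lo, _ => lo
  | fuel + 1, lo, hi =>
    if lo < hi then
      let mid := PySem.Int.floordiv (lo + hi) 2
      if pvGet a mid < x then pvBisectLeftGo a x fuel (mid + 1) hi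
      else pvBisectLeftGo a x fuel lo mid
    else lo

def pvBisectLeft (a : List Int) (x : Int) (lo hi : Int) : Int :=
  pvBisectLeftGo a x (hi - lo).toNat lo hi

-- the 'while lo < hi' loop of Source B's _bisect_right
def pvBisectRightGo (a : List Int) (x : Int) : Nat → Int → Int → Int
  | 0, lo, _ => lo
  | fuel + 1, lo, hi =>
    if lo < hi then
      let mid := PySem.Int.floordiv (lo + hi) 2
      if x < pvGet a mid then pvBisectRightGo a x fuel lo mid
      else pvBisectRightGo a x fuel (mid + 1) hi
    else lo

def pvBisectRight (a : List Int) (x : Int) (lo hi : Int) : Int :=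
  pvBisectRightGo a x (hi - lo).toNat lo hi

def count_triplets_in_range_alt (Arr : List Int) (N : Int) (L : Int) (R : Int) : Int :=
  let s := PySem.List.sorted Arr (fun x => x) false
  (PySem.List.pyRange 0 (N - 2) 1).foldl (fun tot i =>
    (PySem.List.pyRange (i + 1) (N - 1) 1).foldl (fun tot j =>
      let sm := pvGet s i + pvGet s j
      tot + (pvBisectRight s (R - sm) (j + 1) N - pvBisectLeft s (L - sm) (j + 1) N)) tot) 0

-- ===== PRECONDITION & SPEC =====
-- Pre_ excludes exactly the inputs where A raises IndexError: N ≥ 3 together with N > len(Arr)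
def Pre_count_triplets_in_range (Arr : List Int) (N : Int) (L : Int) (R : Int) : Prop :=
  N ≤ (Arr.length : Int) ∨ N < 3
instance (Arr : List Int) (N : Int) (L : Int) (R : Int) : Decidable (Pre_count_triplets_in_range Arr N L R) := by
  unfold Pre_count_triplets_in_range; infer_instance

def pvWitness_count_triplets_in_range : List Int × Int × Int × Int := ([2, 1, 3], 3, 3, 6)

def Spec_count_triplets_in_range (Arr : List Int) (N : Int) (L : Int) (R : Int) (out : Int) : Prop := out = count_triplets_in_range_alt Arr N L R
instance (Arr : List Int) (N : Int) (L : Int) (R : Int) (out : Int) : Decidable (Spec_count_triplets_in_range Arr N L R out) := by unfold Spec_count_triplets_in_range; infer_instance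

-- ===== CLAIM (what is proved, stated in full; the proofs are below) =====
def Claim_equal_count_triplets_in_range : Prop := ∀ (Arr : List Int) (N : Int) (L : Int) (R : Int), Dom_count_triplets_in_range Arr N L R → Pre_count_triplets_in_range Arr N L R → Spec_count_triplets_in_range Arr N L R (count_triplets_in_range Arr N L R)

-- ===== LEMMAS AND PROOFS =====

-- number of y in (x, kk] with s[i] + s[x] + s[y] ≤ T
def pvCnt (s : List Int) (T i x kk : Int) : Nat :=
  (PySem.List.pyRange (x + 1) (kk + 1) 1).countP (fun y => decide (pvGet s i + pvGet s x + pvGet s y ≤ T))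

-- number of pairs x < y with x in [j, kk), y in (x, kk], and s[i] + s[x] + s[y] ≤ T
def pvPairs (s : List Int) (T i j kk : Int) : Nat :=
  ((PySem.List.pyRange j kk 1).map (fun x => pvCnt s T i x kk)).sum

lemma pvGet_mono (s : List Int) (hs : s.Pairwise (· ≤ ·)) (x y : Int)
    (hx : 0 ≤ x) (hxy : x ≤ y) (hy : y < (s.length : Int)) : pvGet s x ≤ pvGet s y := by
  rcases eq_or_lt_of_le hxy with h | h
  · subst h; exact le_refl _
  · rw [pvGet, pvGet, PySem.List.pyGet?_eq_some_getElem s hx (by omega),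
      PySem.List.pyGet?_eq_some_getElem s (by omega) hy]
    exact List.pairwise_iff_getElem.mp hs x.toNat y.toNat (by omega) (by omega) (by omega)

lemma pvPairs_zero (s : List Int) (T i j kk : Int) (h : kk ≤ j) : pvPairs s T i j kk = 0 := by
  simp [pvPairs, PySem.List.pyRange_one_eq_nil h]

lemma pvCnt_full (s : List Int) (hs : s.Pairwise (· ≤ ·)) (T i j k : Int)
    (hj : 0 ≤ j) (hjk : j < k) (hk : k < (s.length : Int))
    (hle : pvGet s i + pvGet s j + pvGet s k ≤ T) :
    pvCnt s T i j k = (k - j).toNat := by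
  rw [pvCnt]
  have : ∀ y ∈ PySem.List.pyRange (j + 1) (k + 1) 1,
      (decide (pvGet s i + pvGet s j + pvGet s y ≤ T)) = true := by
    intro y hy
    rw [PySem.List.mem_pyRange_one] at hy
    have := pvGet_mono s hs y k (by omega) (by omega) hk
    simp; omega
  rw [List.countP_eq_length.mpr this, PySem.List.length_pyRange_one]
  omega

lemma pvCnt_drop_top (s : List Int) (hs : s.Pairwise (· ≤ ·)) (T i j x k : Int)
    (hj : 0 ≤ j) (hjx : j ≤ x) (hxk : x < k) (hk : k < (s.length : Int))
    (hgt : ¬ pvGet s i + pvGet s j + pvGet s k ≤ T) :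
    pvCnt s T i x k = pvCnt s T i x (k - 1) := by
  rw [pvCnt, pvCnt]
  have hsplit : PySem.List.pyRange (x + 1) (k + 1) 1
      = PySem.List.pyRange (x + 1) k 1 ++ [k] := by
    have := PySem.List.pyRange_one_succ_right (a := x + 1) (b := k) (by omega)
    simpa using this
  rw [hsplit, List.countP_append]
  have hxv := pvGet_mono s hs j x hj hjx (by omega)
  have : (k - 1) + 1 = k := by ring
  rw [this]
  simp only [List.countP_cons, List.countP_nil]
  have : (decide (pvGet s i + pvGet s x + pvGet s k ≤ T)) = false := by simp; omega
  simp [this]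

lemma pvPairs_drop_top (s : List Int) (hs : s.Pairwise (· ≤ ·)) (T i j k : Int)
    (hj : 0 ≤ j) (hjk : j < k) (hk : k < (s.length : Int))
    (hgt : ¬ pvGet s i + pvGet s j + pvGet s k ≤ T) :
    pvPairs s T i j k = pvPairs s T i j (k - 1) := by
  rw [pvPairs, pvPairs]
  have hcong : (PySem.List.pyRange j k 1).map (fun x => pvCnt s T i x k)
      = (PySem.List.pyRange j k 1).map (fun x => pvCnt s T i x (k - 1)) := by
    apply List.map_congr_left
    intro x hx
    rw [PySem.List.mem_pyRange_one] at hx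
    exact pvCnt_drop_top s hs T i j x k hj (by omega) (by omega) hk hgt
  rw [hcong]
  have hsplit : PySem.List.pyRange j k 1 = PySem.List.pyRange j (k - 1) 1 ++ [k - 1] := by
    have := PySem.List.pyRange_one_succ_right (a := j) (b := k - 1) (by omega)
    have h2 : (k - 1) + 1 = k := by ring
    rw [h2] at this
    exact this
  rw [hsplit, List.map_append, List.sum_append]
  have hlast : pvCnt s T i (k - 1) (k - 1) = 0 := by
    rw [pvCnt]
    have : (k - 1) + 1 = k := by ring
    rw [this, PySem.List.pyRange_one_eq_nil (by omega)]
    simp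
  simp [hlast]

lemma pvSweepGo_eq (s : List Int) (T i : Int) (hs : s.Pairwise (· ≤ ·)) (hi : 0 ≤ i) :
    ∀ (n : Nat) (j k acc : Int), (k - j).toNat = n → i < j → k < (s.length : Int) →
      pvSweepGo s T i n j k acc = acc + (pvPairs s T i j k : Int) := by
  intro n
  induction n with
  | zero =>
    intro j k acc hn hij hk
    rw [pvSweepGo, pvPairs_zero s T i j k (by omega)]
    simp
  | succ n ih =>
    intro j k acc hn hij hk
    rw [pvSweepGo]
    have hjk : j < k := by omega
    simp only [if_pos hjk]
    by_cases hle : pvGet s i + pvGet s j + pvGet s k ≤ T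
    · simp only [if_pos hle]
      rw [ih (j + 1) k (acc + (k - j)) (by omega) (by omega) hk]
      have hstep : pvPairs s T i j k = pvCnt s T i j k + pvPairs s T i (j + 1) k := by
        rw [pvPairs, PySem.List.pyRange_one_cons hjk]
        simp [pvPairs]
      rw [hstep, pvCnt_full s hs T i j k (by omega) hjk hk hle]
      push_cast [Int.toNat_of_nonneg (by omega : (0:Int) ≤ k - j)]
      ring
    · simp only [if_neg hle]
      rw [ih j (k - 1) acc (by omega) hij (by omega)]
      rw [pvPairs_drop_top s hs T i j k (by omega) hjk hk hle]

lemma pvSweep_eq (s : List Int) (T i : Int) (hs : s.Pairwise (· ≤ ·)) (hi : 0 ≤ i)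
    (j k acc : Int) (hij : i < j) (hk : k < (s.length : Int)) :
    pvSweep s T i j k acc = acc + (pvPairs s T i j k : Int) := by
  rw [pvSweep]
  exact pvSweepGo_eq s T i hs hi (k - j).toNat j k acc rfl hij hk

lemma countP_cut {α : Type} (a : List α) (p : α → Bool) (m : Nat) (hm : m ≤ a.length)
    (h : ∀ idx (hidx : idx < a.length), p a[idx] = decide (idx < m)) : a.countP p = m := by
  have hsplit : a = a.take m ++ a.drop m := (List.take_append_drop m a).symm
  rw [hsplit, List.countP_append]
  have h1 : (a.take m).countP p = (a.take m).length := by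
    rw [List.countP_eq_length]
    intro v hv
    obtain ⟨i, hi, rfl⟩ := List.mem_iff_getElem.mp hv
    have him : i < m := by simp [List.length_take] at hi; omega
    rw [List.getElem_take, h i (by simp [List.length_take] at hi; omega)]
    simp [him]
  have h2 : (a.drop m).countP p = 0 := by
    rw [List.countP_eq_zero]
    intro v hv
    obtain ⟨i, hi, rfl⟩ := List.mem_iff_getElem.mp hv
    rw [List.getElem_drop, h (m + i) (by simp [List.length_drop] at hi; omega)]
    simp
  rw [h1, h2, List.length_take]; omega

-- on the window [A, B) whose indices below lo hold values < x and the rest values ≥ x,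
-- the window count of (< x) is lo - A
lemma windowCount_lt (a : List Int) (x A B lo : Int) (_hA : A ≤ lo) (hB : lo ≤ B)
    (_hBl : B ≤ (a.length : Int)) (_hA0 : 0 ≤ A)
    (hlow : ∀ q : Int, A ≤ q → q < lo → pvGet a q < x)
    (hhigh : ∀ q : Int, lo ≤ q → q < B → x ≤ pvGet a q) :
    (PySem.List.pyRange A B 1).countP (fun q => decide (pvGet a q < x)) = (lo - A).toNat := by
  apply countP_cut
  · simp [PySem.List.length_pyRange_one]; omega
  · intro idx hidx
    simp only [PySem.List.length_pyRange_one] at hidx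
    rw [PySem.List.getElem_pyRange_one]
    by_cases hcase : A + (idx : Int) < lo
    · have := hlow (A + idx) (by omega) hcase
      simp at this ⊢
      constructor <;> intro <;> omega
    · have := hhigh (A + idx) (by omega) (by omega)
      simp at this ⊢
      omega

lemma windowCount_le (a : List Int) (x A B lo : Int) (_hA : A ≤ lo) (hB : lo ≤ B)
    (_hBl : B ≤ (a.length : Int)) (_hA0 : 0 ≤ A)
    (hlow : ∀ q : Int, A ≤ q → q < lo → pvGet a q ≤ x)
    (hhigh : ∀ q : Int, lo ≤ q → q < B → x < pvGet a q) :
    (PySem.List.pyRange A B 1).countP (fun q => decide (pvGet a q ≤ x)) = (lo - A).toNat := by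
  apply countP_cut
  · simp [PySem.List.length_pyRange_one]; omega
  · intro idx hidx
    simp only [PySem.List.length_pyRange_one] at hidx
    rw [PySem.List.getElem_pyRange_one]
    by_cases hcase : A + (idx : Int) < lo
    · have := hlow (A + idx) (by omega) hcase
      simp at this ⊢
      constructor <;> intro <;> omega
    · have := hhigh (A + idx) (by omega) (by omega)
      simp at this ⊢
      omega

lemma pvBisectLeftGo_eq (a : List Int) (hs : a.Pairwise (· ≤ ·)) (x A B : Int)
    (hA0 : 0 ≤ A) (hBl : B ≤ (a.length : Int)) :
    ∀ (n : Nat) (lo hi : Int), (hi - lo).toNat ≤ n → A ≤ lo → lo ≤ hi → hi ≤ B →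
      (∀ q : Int, A ≤ q → q < lo → pvGet a q < x) →
      (∀ q : Int, hi ≤ q → q < B → x ≤ pvGet a q) →
      pvBisectLeftGo a x n lo hi
        = A + ((PySem.List.pyRange A B 1).countP (fun q => decide (pvGet a q < x)) : Int) := by
  intro n
  induction n with
  | zero =>
    intro lo hi hn hA hlh hhB hlow hhigh
    have hlo : lo = hi := by omega
    rw [pvBisectLeftGo,
      windowCount_lt a x A B lo hA (by omega) hBl hA0 hlow (by rw [hlo]; exact hhigh)]
    omega
  | succ n ih =>
    intro lo hi hn hA hlh hhB hlow hhigh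
    rw [pvBisectLeftGo]
    by_cases hlt : lo < hi
    · simp only [if_pos hlt]
      have hm1 := (PySem.Int.le_floordiv_iff_mul_le (a := lo + hi) (b := 2) (q := lo) (by omega)).mpr (by omega)
      have hm2 := (PySem.Int.floordiv_lt_iff_lt_mul (a := lo + hi) (b := 2) (q := hi) (by omega)).mpr (by omega)
      set mid := PySem.Int.floordiv (lo + hi) 2 with hmid
      by_cases hc : pvGet a mid < x
      · simp only [if_pos hc]
        refine ih (mid + 1) hi (by omega) (by omega) (by omega) hhB ?_ hhigh
        intro q hq0 hqlt
        by_cases hql : q < lo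
        · exact hlow q hq0 hql
        · exact lt_of_le_of_lt (pvGet_mono a hs q mid (by omega) (by omega) (by omega)) hc
      · simp only [if_neg hc]
        refine ih lo mid (by omega) hA (by omega) (by omega) hlow ?_
        intro q hq hql
        exact le_trans (by omega) (pvGet_mono a hs mid q (by omega) hq (by omega))
    · simp only [if_neg hlt]
      have hlo : lo = hi := by omega
      rw [windowCount_lt a x A B lo hA (by omega) hBl hA0 hlow (by rw [hlo]; exact hhigh)]
      omega

lemma pvBisectRightGo_eq (a : List Int) (hs : a.Pairwise (· ≤ ·)) (x A B : Int)
    (hA0 : 0 ≤ A) (hBl : B ≤ (a.length : Int)) :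
    ∀ (n : Nat) (lo hi : Int), (hi - lo).toNat ≤ n → A ≤ lo → lo ≤ hi → hi ≤ B →
      (∀ q : Int, A ≤ q → q < lo → pvGet a q ≤ x) →
      (∀ q : Int, hi ≤ q → q < B → x < pvGet a q) →
      pvBisectRightGo a x n lo hi
        = A + ((PySem.List.pyRange A B 1).countP (fun q => decide (pvGet a q ≤ x)) : Int) := by
  intro n
  induction n with
  | zero =>
    intro lo hi hn hA hlh hhB hlow hhigh
    have hlo : lo = hi := by omega
    rw [pvBisectRightGo,
      windowCount_le a x A B lo hA (by omega) hBl hA0 hlow (by rw [hlo]; exact hhigh)]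
    omega
  | succ n ih =>
    intro lo hi hn hA hlh hhB hlow hhigh
    rw [pvBisectRightGo]
    by_cases hlt : lo < hi
    · simp only [if_pos hlt]
      have hm1 := (PySem.Int.le_floordiv_iff_mul_le (a := lo + hi) (b := 2) (q := lo) (by omega)).mpr (by omega)
      have hm2 := (PySem.Int.floordiv_lt_iff_lt_mul (a := lo + hi) (b := 2) (q := hi) (by omega)).mpr (by omega)
      set mid := PySem.Int.floordiv (lo + hi) 2 with hmid
      by_cases hc : x < pvGet a mid
      · simp only [if_pos hc]
        refine ih lo mid (by omega) hA (by omega) (by omega) hlow ?_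
        intro q hq hql
        exact lt_of_lt_of_le hc (pvGet_mono a hs mid q (by omega) hq (by omega))
      · simp only [if_neg hc]
        refine ih (mid + 1) hi (by omega) (by omega) (by omega) hhB ?_ hhigh
        intro q hq0 hqlt
        by_cases hql : q < lo
        · exact hlow q hq0 hql
        · exact le_trans (pvGet_mono a hs q mid (by omega) (by omega) (by omega)) (by omega)
    · simp only [if_neg hlt]
      have hlo : lo = hi := by omega
      rw [windowCount_le a x A B lo hA (by omega) hBl hA0 hlow (by rw [hlo]; exact hhigh)]
      omega

lemma pvBisectLeft_eq (a : List Int) (hs : a.Pairwise (· ≤ ·)) (x A B : Int)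
    (hA0 : 0 ≤ A) (hAB : A ≤ B) (hBl : B ≤ (a.length : Int)) :
    pvBisectLeft a x A B
      = A + ((PySem.List.pyRange A B 1).countP (fun q => decide (pvGet a q < x)) : Int) := by
  rw [pvBisectLeft]
  exact pvBisectLeftGo_eq a hs x A B hA0 hBl (B - A).toNat A B (by omega) (by omega) hAB
    (by omega) (by intro q h1 h2; omega) (by intro q h1 h2; omega)

lemma pvBisectRight_eq (a : List Int) (hs : a.Pairwise (· ≤ ·)) (x A B : Int)
    (hA0 : 0 ≤ A) (hAB : A ≤ B) (hBl : B ≤ (a.length : Int)) :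
    pvBisectRight a x A B
      = A + ((PySem.List.pyRange A B 1).countP (fun q => decide (pvGet a q ≤ x)) : Int) := by
  rw [pvBisectRight]
  exact pvBisectRightGo_eq a hs x A B hA0 hBl (B - A).toNat A B (by omega) (by omega) hAB
    (by omega) (by intro q h1 h2; omega) (by intro q h1 h2; omega)

lemma sum_map_sub_int {α : Type} (l : List α) (f g : α → Int) :
    (l.map (fun x => f x - g x)).sum = (l.map f).sum - (l.map g).sum := by
  induction l with
  | nil => simp
  | cons x xs ih => simp [ih]; ring

-- ===== VERDICT (by name: the statement is the Claim_ definition above) =====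
theorem count_triplets_in_range_spec : Claim_equal_count_triplets_in_range := by
  intro Arr N L R _hDom hPre
  unfold Spec_count_triplets_in_range
  by_cases hNlen : N ≤ (Arr.length : Int)
  case neg =>
    have hN3 : N < 3 := by
      rcases hPre with h | h
      · exact absurd h hNlen
      · exact h
    rw [count_triplets_in_range, count_triplets_in_range_alt]
    simp only [PySem.List.pyRange_one_eq_nil (by omega : N - 2 ≤ 0), List.foldl_nil]
    norm_num
  case pos =>
    rw [count_triplets_in_range, count_triplets_in_range_alt]
    set s := PySem.List.sorted Arr (fun x => x) false with hsdef
    have hs : s.Pairwise (· ≤ ·) := PySem.List.sorted_pairwise Arr (fun x => x)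
    have hlen : (s.length : Int) = (Arr.length : Int) := by
      rw [hsdef, PySem.List.length_sorted]
    have hNs : N ≤ (s.length : Int) := by omega
    -- A side: each sweep is a pair count
    have hA : ∀ T : Int,
        (PySem.List.pyRange 0 (N - 2) 1).foldl (fun acc i => pvSweep s T i (i + 1) (N - 1) acc) 0
          = ((PySem.List.pyRange 0 (N - 2) 1).map
              (fun i => (pvPairs s T i (i + 1) (N - 1) : Int))).sum := by
      intro T
      rw [PySem.List.foldl_congr_mem _ _
        (fun acc i => acc + (pvPairs s T i (i + 1) (N - 1) : Int)) 0 ?_]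
      · rw [PySem.List.foldl_add]
        simp
      · intro acc x hx
        rw [PySem.List.mem_pyRange_one] at hx
        exact pvSweep_eq s T x hs (by omega) (x + 1) (N - 1) acc (by omega) (by omega)
    rw [hA R, hA (L - 1), ← sum_map_sub_int]
    -- B side: flatten the two nested folds into sums
    rw [PySem.List.foldl_congr_mem _ _
      (fun tot i => tot + ((PySem.List.pyRange (i + 1) (N - 1) 1).map (fun j =>
        pvBisectRight s (R - (pvGet s i + pvGet s j)) (j + 1) N
          - pvBisectLeft s (L - (pvGet s i + pvGet s j)) (j + 1) N)).sum) 0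
      (by
        intro acc x hx
        exact PySem.List.foldl_add _ _ acc)]
    rw [PySem.List.foldl_add]
    simp only [zero_add]
    -- now compare the two sums term by term
    apply congrArg List.sum
    apply List.map_congr_left
    intro i hi
    rw [PySem.List.mem_pyRange_one] at hi
    -- per fixed i
    have hcast : ∀ T : Int, (pvPairs s T i (i + 1) (N - 1) : Int)
        = ((PySem.List.pyRange (i + 1) (N - 1) 1).map
            (fun j => (pvCnt s T i j (N - 1) : Int))).sum := by
      intro T
      rw [pvPairs, Nat.cast_list_sum, List.map_map]
      rfl
    rw [hcast R, hcast (L - 1), ← sum_map_sub_int]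
    apply congrArg List.sum
    apply List.map_congr_left
    intro j hj
    rw [PySem.List.mem_pyRange_one] at hj
    -- per fixed (i, j): the two bounded binary searches count the third elements
    have hj0 : 0 ≤ j := by omega
    rw [pvBisectRight_eq s hs (R - (pvGet s i + pvGet s j)) (j + 1) N (by omega) (by omega) hNs,
      pvBisectLeft_eq s hs (L - (pvGet s i + pvGet s j)) (j + 1) N (by omega) (by omega) hNs]
    have hcntR : (PySem.List.pyRange (j + 1) N 1).countP
        (fun q => decide (pvGet s q ≤ R - (pvGet s i + pvGet s j))) = pvCnt s R i j (N - 1) := by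
      rw [pvCnt]
      have hN1 : (N - 1) + 1 = N := by ring
      rw [hN1]
      apply List.countP_congr
      intro y hy
      simp only [decide_eq_true_eq]
      omega
    have hcntL : (PySem.List.pyRange (j + 1) N 1).countP
        (fun q => decide (pvGet s q < L - (pvGet s i + pvGet s j))) = pvCnt s (L - 1) i j (N - 1) := by
      rw [pvCnt]
      have hN1 : (N - 1) + 1 = N := by ring
      rw [hN1]
      apply List.countP_congr
      intro y hy
      simp only [decide_eq_true_eq]
      omega
    rw [hcntR, hcntL]
    ring
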